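-- pv_equiv track=rewrite | github.com/IvanKalug-QA/codewars | Greatest_Common_Divisor_Bitcount.py | binary_gcd
-- ===== SOURCE A (Python) =====
-- def binary_gcd(x, y):
--     x = abs(x)
--     y = abs(y)
--
--     if x == 0 and y == 0:
--         return 0
--
--     while y != 0:
--         x, y = y, x % y
--
--     return bin(x).count('1')
-- ===== SOURCE B (Python) =====
-- def binary_gcd(x, y):
--     a, b = abs(x), abs(y)
--     if a == 0:
--         g = b
--     elif b == 0:
--         g = a
--     else:
--         shift = 0
--         while a % 2 == 0 and b % 2 == 0:
--             a //= 2
--             b //= 2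
--             shift += 1
--         while a % 2 == 0:
--             a //= 2
--         while b % 2 == 0:
--             b //= 2
--         while a != b:
--             if a > b:
--                 a -= b
--                 while a % 2 == 0:
--                     a //= 2
--             else:
--                 b -= a
--                 while b % 2 == 0:
--                     b //= 2
--         g = a << shift
--     return bin(g).count('1')
-- ===== Notes on version B (the rewrite author's own statement) =====
-- stated objective: alternative
-- what changed: Replaced the Euclidean modulo loop with Stein's binary GCD (shift out common powers of two, strip remaining twos, subtract-and-halve until equal, shift back) before counting set bits.
import Mathlib
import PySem

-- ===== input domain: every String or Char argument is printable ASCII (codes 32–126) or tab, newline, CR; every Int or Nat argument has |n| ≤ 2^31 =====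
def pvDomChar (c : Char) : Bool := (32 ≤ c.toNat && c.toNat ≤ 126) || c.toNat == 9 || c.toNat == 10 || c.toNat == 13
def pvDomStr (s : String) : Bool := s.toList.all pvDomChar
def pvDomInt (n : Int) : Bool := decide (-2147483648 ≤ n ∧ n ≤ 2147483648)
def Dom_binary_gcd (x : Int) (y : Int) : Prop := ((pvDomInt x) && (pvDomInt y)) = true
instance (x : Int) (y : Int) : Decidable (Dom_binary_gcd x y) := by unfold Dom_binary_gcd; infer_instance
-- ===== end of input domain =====

-- B replaces the Euclidean modulo loop by Stein's binary GCD (shifts/subtractions); same bit count returned.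

-- ===== PORT A =====
-- bin(n).count('1') for n ≥ 0: sum of binary digits (exact for the nonnegative values both programs feed it)
def popcount (n : Nat) : Nat :=
  if n = 0 then 0 else n % 2 + popcount (n / 2)
decreasing_by exact Nat.div_lt_self (Nat.pos_of_ne_zero (by assumption)) (by norm_num)

-- the Euclidean while-loop of A; both operands are nonnegative there, where Python's % equals Nat's %
def euclidLoop (x y : Nat) : Nat :=
  if h : y = 0 then x else euclidLoop y (x % y)
decreasing_by exact Nat.mod_lt _ (Nat.pos_of_ne_zero h)

def binary_gcd (x : Int) (y : Int) : Int :=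
  let a := x.natAbs      -- abs(x)
  let b := y.natAbs      -- abs(y)
  if a = 0 ∧ b = 0 then 0
  else (popcount (euclidLoop a b) : Int)

-- ===== PORT B =====
-- `while n % 2 == 0: n //= 2` on a positive n
def oddPart (n : Nat) : Nat :=
  if n = 0 then 0 else if n % 2 = 0 then oddPart (n / 2) else n
decreasing_by exact Nat.div_lt_self (Nat.pos_of_ne_zero (by assumption)) (by norm_num)

-- `while a % 2 == 0 and b % 2 == 0: a //= 2; b //= 2; shift += 1`
-- (the `a ≠ 0` conjunct is a totality guard only: B always calls this with a > 0, where it is implied by a % 2 = 0 ∨ a odd)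
def steinShift (a b s : Nat) : Nat × Nat × Nat :=
  if h : a ≠ 0 ∧ a % 2 = 0 ∧ b % 2 = 0 then steinShift (a / 2) (b / 2) (s + 1)
  else (a, b, s)
decreasing_by exact Nat.div_lt_self (Nat.pos_of_ne_zero h.1) (by norm_num)

theorem oddPart_le (n : Nat) : oddPart n ≤ n := by
  fun_induction oddPart n with
  | case1 => simp
  | case2 n h1 h2 ih => exact le_trans ih (Nat.div_le_self _ _)
  | case3 n h1 h2 => exact le_rfl

-- `while a != b: subtract the smaller, strip twos`  (the zero guards are totality guards only:
-- B always calls this with both arguments odd and positive, so they never fire)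
def steinLoop (a b : Nat) : Nat :=
  if a = 0 then b
  else if b = 0 then a
  else if a = b then a
  else if a > b then steinLoop (oddPart (a - b)) b
  else steinLoop a (oddPart (b - a))
termination_by a + b
decreasing_by
  · have : oddPart (a - b) ≤ a - b := oddPart_le _
    omega
  · have : oddPart (b - a) ≤ b - a := oddPart_le _
    omega

def binary_gcd_alt (x : Int) (y : Int) : Int :=
  let a := x.natAbs
  let b := y.natAbs
  let g :=
    if a = 0 then b
    else if b = 0 then a
    else
      let r := steinShift a b 0
      (steinLoop (oddPart r.1) (oddPart r.2.1)) <<< r.2.2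
  (popcount g : Int)

-- ===== PRECONDITION & SPEC =====
def Spec_binary_gcd (x : Int) (y : Int) (out : Int) : Prop := out = binary_gcd_alt x y
instance (x : Int) (y : Int) (out : Int) : Decidable (Spec_binary_gcd x y out) := by unfold Spec_binary_gcd; infer_instance

-- ===== CLAIM (what is proved, stated in full; the proofs are below) =====
def Claim_equal_binary_gcd : Prop := ∀ (x : Int) (y : Int), Dom_binary_gcd x y → Spec_binary_gcd x y (binary_gcd x y)

-- ===== LEMMAS AND PROOFS =====

theorem euclidLoop_eq_gcd (x y : Nat) : euclidLoop x y = Nat.gcd y x := by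
  fun_induction euclidLoop x y with
  | case1 x => simp
  | case2 x y h ih => rw [ih, Nat.gcd_rec y x]

theorem oddPart_zero : oddPart 0 = 0 := by simp [oddPart]

theorem oddPart_even (n : Nat) (h : n % 2 = 0) : oddPart n = oddPart (n / 2) := by
  by_cases h0 : n = 0
  · subst h0; simp [oddPart]
  · rw [oddPart]; simp [h0, h]

theorem oddPart_of_odd (n : Nat) (h : n % 2 = 1) : oddPart n = n := by
  have h0 : n ≠ 0 := by omega
  rw [oddPart]; simp [h0, show ¬ n % 2 = 0 by omega]

theorem oddPart_odd (n : Nat) (h : 0 < n) : oddPart n % 2 = 1 := by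
  induction n using Nat.strong_induction_on with
  | _ n ih =>
    by_cases h2 : n % 2 = 0
    · rw [oddPart_even n h2]
      exact ih (n / 2) (by omega) (by omega)
    · rw [oddPart_of_odd n (by omega)]; omega

theorem exists_pow_oddPart (n : Nat) : ∃ k, n = 2 ^ k * oddPart n := by
  induction n using Nat.strong_induction_on with
  | _ n ih =>
    by_cases h0 : n = 0
    · exact ⟨0, by simp [h0, oddPart_zero]⟩
    by_cases h2 : n % 2 = 0
    · obtain ⟨k, hk⟩ := ih (n / 2) (by omega)
      refine ⟨k + 1, ?_⟩
      rw [oddPart_even n h2]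
      calc n = 2 * (n / 2) := by omega
        _ = 2 * (2 ^ k * oddPart (n / 2)) := by rw [← hk]
        _ = 2 ^ (k + 1) * oddPart (n / 2) := by ring
    · exact ⟨0, by rw [oddPart_of_odd n (by omega)]; simp⟩

-- gcd with an odd number ignores a factor 2 of the other argument
theorem gcd_div2_odd (m v : Nat) (hm : m % 2 = 0) (hv : v % 2 = 1) :
    Nat.gcd m v = Nat.gcd (m / 2) v := by
  have hcop : Nat.Coprime 2 v := Nat.coprime_two_left.mpr (Nat.odd_iff.mpr hv)
  have h2 : m = 2 * (m / 2) := by omega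
  calc Nat.gcd m v = Nat.gcd (2 * (m / 2)) v := by rw [← h2]
    _ = Nat.gcd (m / 2) v := Nat.Coprime.gcd_mul_left_cancel _ hcop

theorem gcd_oddPart_left (m v : Nat) (hv : v % 2 = 1) :
    Nat.gcd (oddPart m) v = Nat.gcd m v := by
  induction m using Nat.strong_induction_on with
  | _ m ih =>
    by_cases h0 : m = 0
    · rw [h0, oddPart_zero]
    by_cases h2 : m % 2 = 0
    · rw [oddPart_even m h2, ih (m / 2) (by omega), ← gcd_div2_odd m v h2 hv]
    · rw [oddPart_of_odd m (by omega)]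

theorem gcd_oddPart_right (u m : Nat) (hu : u % 2 = 1) :
    Nat.gcd u (oddPart m) = Nat.gcd u m := by
  rw [Nat.gcd_comm, gcd_oddPart_left m u hu, Nat.gcd_comm]

-- the subtract-and-strip loop computes the gcd of two odd positive numbers
theorem steinLoop_eq_gcd (a b : Nat) (ha : a % 2 = 1) (hb : b % 2 = 1) :
    steinLoop a b = Nat.gcd a b := by
  fun_induction steinLoop a b with
  | case1 b => simp
  | case2 a h => simp
  | case3 b h1 h2 => simp
  | case4 a b h1 h2 h3 h4 ih =>
    rw [ih (oddPart_odd _ (by omega)) hb, gcd_oddPart_left _ _ hb,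
        Nat.gcd_sub_self_left (by omega)]
  | case5 a b h1 h2 h3 h4 ih =>
    rw [ih ha (oddPart_odd _ (by omega)), gcd_oddPart_right _ _ ha,
        Nat.gcd_sub_self_right (by omega)]

-- the common-shift loop preserves odd parts and positivity
theorem steinShift_spec (a b s : Nat) (ha : 0 < a) (hb : 0 < b) :
    oddPart (steinShift a b s).1 = oddPart a ∧
    oddPart (steinShift a b s).2.1 = oddPart b ∧
    0 < (steinShift a b s).1 ∧ 0 < (steinShift a b s).2.1 := by
  fun_induction steinShift a b s with
  | case1 a b s h ih =>
    obtain ⟨h1, h2, h3⟩ := h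
    obtain ⟨i1, i2, i3, i4⟩ := ih (by omega) (by omega)
    exact ⟨by rw [i1]; exact (oddPart_even a h2).symm,
           by rw [i2]; exact (oddPart_even b h3).symm, i3, i4⟩
  | case2 a b s h => exact ⟨rfl, rfl, ha, hb⟩

-- popcount ignores factors of two
theorem popcount_two_mul (n : Nat) : popcount (2 * n) = popcount n := by
  rcases Nat.eq_zero_or_pos n with h | h
  · simp [h]
  · rw [popcount]
    have hne : ¬ (2 * n = 0) := by omega
    have h1 : 2 * n % 2 = 0 := by omega
    have h2 : 2 * n / 2 = n := by omega
    simp [hne, h1, h2]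

theorem popcount_pow_mul (k n : Nat) : popcount (2 ^ k * n) = popcount n := by
  induction k with
  | zero => simp
  | succ k ih =>
    have h : 2 ^ (k + 1) * n = 2 * (2 ^ k * n) := by ring
    rw [h, popcount_two_mul, ih]

-- gcd and the gcd of the odd parts differ only by a power of two
theorem gcd_oddPart_aux (N : Nat) : ∀ a b : Nat, a + b ≤ N →
    ∃ k, Nat.gcd a b = 2 ^ k * Nat.gcd (oddPart a) (oddPart b) := by
  induction N with
  | zero =>
    intro a b h
    have hab : a = 0 ∧ b = 0 := by omega
    exact ⟨0, by simp [hab.1, hab.2, oddPart_zero]⟩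
  | succ N ih =>
    intro a b hab
    rcases Nat.eq_zero_or_pos a with ha | ha
    · subst ha
      obtain ⟨k, hk⟩ := exists_pow_oddPart b
      exact ⟨k, by simpa [oddPart_zero] using hk⟩
    rcases Nat.eq_zero_or_pos b with hb | hb
    · subst hb
      obtain ⟨k, hk⟩ := exists_pow_oddPart a
      exact ⟨k, by simpa [oddPart_zero] using hk⟩
    by_cases ha2 : a % 2 = 0
    · by_cases hb2 : b % 2 = 0
      · -- both even
        obtain ⟨k, hk⟩ := ih (a / 2) (b / 2) (by omega)
        refine ⟨k + 1, ?_⟩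
        have hg : Nat.gcd a b = 2 * Nat.gcd (a / 2) (b / 2) := by
          have e1 : a = 2 * (a / 2) := by omega
          have e2 : b = 2 * (b / 2) := by omega
          conv_lhs => rw [e1, e2]
          exact Nat.gcd_mul_left 2 (a / 2) (b / 2)
        rw [hg, hk, oddPart_even a ha2, oddPart_even b hb2, pow_succ]
        ring
      · -- a even, b odd
        obtain ⟨k, hk⟩ := ih (a / 2) b (by omega)
        refine ⟨k, ?_⟩
        rw [gcd_div2_odd a b ha2 (by omega), hk, oddPart_even a ha2]
    · by_cases hb2 : b % 2 = 0
      · -- a odd, b even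
        obtain ⟨k, hk⟩ := ih a (b / 2) (by omega)
        refine ⟨k, ?_⟩
        rw [Nat.gcd_comm a b, gcd_div2_odd b a hb2 (by omega), Nat.gcd_comm (b / 2) a, hk,
          oddPart_even b hb2]
      · -- both odd
        refine ⟨0, ?_⟩
        rw [oddPart_of_odd a (by omega), oddPart_of_odd b (by omega)]
        simp

-- popcount of the gcd equals popcount of the gcd of the odd parts
theorem popcount_gcd_oddPart (a b : Nat) :
    popcount (Nat.gcd a b) = popcount (Nat.gcd (oddPart a) (oddPart b)) := by
  obtain ⟨k, hk⟩ := gcd_oddPart_aux (a + b) a b le_rfl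
  rw [hk, popcount_pow_mul]

-- the two algorithms agree on the absolute values
theorem main_nat (a b : Nat) :
    (if a = 0 ∧ b = 0 then (0 : Int) else (popcount (euclidLoop a b) : Int)) =
    (popcount (if a = 0 then b else if b = 0 then a
      else (steinLoop (oddPart (steinShift a b 0).1) (oddPart (steinShift a b 0).2.1)) <<<
        (steinShift a b 0).2.2) : Int) := by
  rcases Nat.eq_zero_or_pos a with ha | ha
  · subst ha
    rcases Nat.eq_zero_or_pos b with hb | hb
    · subst hb; simp [popcount]
    · have h1 : ¬ ((0 : Nat) = 0 ∧ b = 0) := by omega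
      rw [euclidLoop_eq_gcd, Nat.gcd_zero_right]
      simp [show b ≠ 0 by omega]
  · rcases Nat.eq_zero_or_pos b with hb | hb
    · subst hb
      have h1 : ¬ (a = 0 ∧ (0 : Nat) = 0) := by omega
      have h2 : ¬ (a = 0) := by omega
      rw [euclidLoop_eq_gcd, Nat.gcd_zero_left]
      simp [show a ≠ 0 by omega]
    · have h1 : ¬ (a = 0 ∧ b = 0) := by omega
      have h2 : ¬ (a = 0) := by omega
      have h3 : ¬ (b = 0) := by omega
      obtain ⟨s1, s2, s3, s4⟩ := steinShift_spec a b 0 ha hb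
      rw [if_neg h1, if_neg h2, if_neg h3, euclidLoop_eq_gcd, s1, s2,
        steinLoop_eq_gcd _ _ (oddPart_odd a ha) (oddPart_odd b hb),
        Nat.shiftLeft_eq, Nat.mul_comm, popcount_pow_mul,
        Nat.gcd_comm b a, popcount_gcd_oddPart a b]

-- ===== VERDICT (by name: the statement is the Claim_ definition above) =====
theorem binary_gcd_spec : Claim_equal_binary_gcd := by
  intro x y _
  unfold Spec_binary_gcd binary_gcd binary_gcd_alt
  exact main_nat x.natAbs y.natAbs
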